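-- pv_equiv track=rewrite | github.com/pokerdio/generic | euler/euler-776.py | _go
-- ===== SOURCE A (Python) =====
-- from builtins import sum
--
-- def _go(n):
--     ndigitz = len(str(n))
--     app = [0] * (9 * ndigitz + 1)
--     multi = [0] * len(app)
--     for i in range(1, n + 1):
--         s = sum(int(d) for d in str(i))
--         app[s] += 1
--         multi[s] += i
--     return app, multi
-- ===== SOURCE B (Python) =====
-- def _go(n):
--     # Digit DP: one recursion over n's decimal digits instead of scanning 1..n.
--     L = 9 * len(str(n)) + 1
--
--     def dsum(m):
--         t = 0
--         while m:
--             t += m % 10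
--             m //= 10
--         return t
--
--     def rec(m):
--         # counts and sums of i in [0, m) grouped by digit sum, for sums 0..L-1
--         if m == 0:
--             return [0] * L, [0] * L
--         q, r = divmod(m, 10)
--         a1, m1 = rec(q)
--         dq = dsum(q)
--         app = [sum(a1[s - z] for z in range(10) if z <= s)
--                + (1 if dq <= s < dq + r else 0) for s in range(L)]
--         multi = [sum(10 * m1[s - z] + z * a1[s - z] for z in range(10) if z <= s)
--                  + (10 * q + s - dq if dq <= s < dq + r else 0) for s in range(L)]
--         return app, multi
--
--     if n < 1:
--         return [0] * L, [0] * L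
--     app, multi = rec(n + 1)
--     app[0] -= 1
--     return app, multi
-- ===== Notes on version B (the rewrite author's own statement) =====
-- stated objective: faster
-- what changed: Replaces the per-integer scan of 1..n (string-converting every i to take its digit sum) by a digit DP: one recursion over n's decimal digits that combines the per-digit-sum count and sum arrays of a prefix range from those of its quotient by ten.
import Mathlib
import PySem

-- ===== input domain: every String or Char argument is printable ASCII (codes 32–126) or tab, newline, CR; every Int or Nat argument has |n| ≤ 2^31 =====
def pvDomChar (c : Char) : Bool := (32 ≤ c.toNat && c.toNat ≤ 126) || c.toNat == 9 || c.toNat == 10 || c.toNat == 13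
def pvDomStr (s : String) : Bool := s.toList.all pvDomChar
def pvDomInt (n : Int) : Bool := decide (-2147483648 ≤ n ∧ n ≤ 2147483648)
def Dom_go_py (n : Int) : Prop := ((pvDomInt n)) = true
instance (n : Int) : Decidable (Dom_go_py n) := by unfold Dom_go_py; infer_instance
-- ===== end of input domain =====

-- B replaces A's per-integer scan of 1..n by a digit DP over n's decimal digits (objective: faster).

-- ===== PORT A =====
def go_py (n : Int) : List Int × List Int :=
  let ndigitz : Int := PySem.Str.len (PySem.Int.toStr n)
  let app : List Int := PySem.List.pyRepeat [0] (9 * ndigitz + 1)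
  let multi : List Int := PySem.List.pyRepeat [0] (PySem.List.len app)
  (PySem.List.pyRange 1 (n + 1) 1).foldl
    (fun st i =>
      -- s = sum(int(d) for d in str(i)); int(d) on a single decimal-digit char d is d.toNat - 48
      -- (exact here: str(i) for the i ≥ 1 this loop visits consists of digit characters only)
      let s : Int := ((PySem.Int.toStr i).toList.map (fun d => (d.toNat : Int) - 48)).sum
      (PySem.List.pySetD st.1 s (PySem.List.pyGetD st.1 s 0 + 1),
       PySem.List.pySetD st.2 s (PySem.List.pyGetD st.2 s 0 + i)))
    (app, multi)

-- ===== PORT B =====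
-- dsum(m): digit sum of m ≥ 0 by repeated divmod 10 (Source B's while loop)
def bDsum (m : Nat) : Nat :=
  if h : m = 0 then 0
  else m % 10 + bDsum (m / 10)
decreasing_by exact Nat.div_lt_self (Nat.pos_of_ne_zero h) (by norm_num)

-- rec(m): per-digit-sum counts and sums of [0, m), built from those of [0, m // 10)
def bRec (L : Nat) (m : Nat) : List Int × List Int :=
  if h : m = 0 then (List.replicate L 0, List.replicate L 0)
  else
    let q := m / 10
    let r := m % 10
    let p := bRec L q
    let a1 := p.1
    let m1 := p.2
    let dq := bDsum q
    (((List.range L).map fun s =>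
        (((List.range 10).filter (fun z => z ≤ s)).map (fun z => a1.getD (s - z) 0)).sum
        + (if dq ≤ s ∧ s < dq + r then 1 else 0)),
     ((List.range L).map fun s =>
        (((List.range 10).filter (fun z => z ≤ s)).map
            (fun z => 10 * m1.getD (s - z) 0 + (z : Int) * a1.getD (s - z) 0)).sum
        + (if dq ≤ s ∧ s < dq + r then 10 * (q : Int) + (s : Int) - (dq : Int) else 0)))
decreasing_by exact Nat.div_lt_self (Nat.pos_of_ne_zero h) (by norm_num)

def go_py_alt (n : Int) : List Int × List Int :=
  let L : Nat := (9 * PySem.Str.len (PySem.Int.toStr n) + 1).toNat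
  if n < 1 then (List.replicate L 0, List.replicate L 0)
  else
    let p := bRec L (n + 1).toNat
    (p.1.set 0 (p.1.getD 0 0 - 1), p.2)

-- ===== PRECONDITION & SPEC =====
def Spec_go_py (n : Int) (out : List Int × List Int) : Prop := out = go_py_alt n
instance (n : Int) (out : List Int × List Int) : Decidable (Spec_go_py n out) := by unfold Spec_go_py; infer_instance

-- ===== CLAIM (what is proved, stated in full; the proofs are below) =====
def Claim_equal_go_py : Prop := ∀ (n : Int), Dom_go_py n → Spec_go_py n (go_py n)

-- ===== LEMMAS AND PROOFS =====

-- count / sum of i in [0, m) with digit sum s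
def cntF (m s : Nat) : Nat := ((Finset.range m).filter (fun i => bDsum i = s)).card
def smF (m s : Nat) : Nat := ∑ i ∈ (Finset.range m).filter (fun i => bDsum i = s), i
-- count / sum of i in [1, k] with digit sum s (what A tabulates)
def cntA (k s : Nat) : Nat := ((Finset.Icc 1 k).filter (fun i => bDsum i = s)).card
def smA (k s : Nat) : Nat := ∑ i ∈ (Finset.Icc 1 k).filter (fun i => bDsum i = s), i

-- decimal digit characters of m, most significant first (what str(m) produces for m ≥ 0)
def decChars (m : Nat) : List Char :=
  if m < 10 then [Nat.digitChar m]
  else decChars (m / 10) ++ [Nat.digitChar (m % 10)]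
decreasing_by exact Nat.div_lt_self (by omega) (by norm_num)

theorem digitChar_toNat {d : Nat} (h : d < 10) : (Nat.digitChar d).toNat = 48 + d := by
  interval_cases d <;> decide

theorem bDsum_zero : bDsum 0 = 0 := by rw [bDsum]; rfl

theorem bDsum_lt10 {m : Nat} (h : m < 10) : bDsum m = m := by
  rw [bDsum]
  by_cases h0 : m = 0
  · simp [h0]
  · rw [dif_neg h0, Nat.mod_eq_of_lt h, Nat.div_eq_of_lt h, bDsum_zero]
    omega

theorem sum_decChars (m : Nat) :
    ((decChars m).map (fun d => (d.toNat : Int) - 48)).sum = (bDsum m : Int) := by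
  induction m using decChars.induct with
  | case1 m h =>
    rw [decChars, if_pos h, bDsum_lt10 h]
    simp [digitChar_toNat h]
  | case2 m h ih =>
    rw [decChars, if_neg h]
    rw [bDsum, dif_neg (by omega)]
    simp only [List.map_append, List.sum_append, ih]
    simp [digitChar_toNat (Nat.mod_lt m (by norm_num))]
    ring

theorem len_decChars_mono {m n : Nat} (h : m ≤ n) :
    (decChars m).length ≤ (decChars n).length := by
  induction n using decChars.induct generalizing m with
  | case1 n hn =>
    conv_lhs => rw [decChars]
    conv_rhs => rw [decChars]
    rw [if_pos hn, if_pos (by omega : m < 10)]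
    simp
  | case2 n hn ih =>
    conv_rhs => rw [decChars]
    rw [if_neg hn]
    by_cases hm : m < 10
    · conv_lhs => rw [decChars]
      rw [if_pos hm]
      have h1 : 1 ≤ (decChars (n / 10)).length := by
        rw [decChars]
        split <;> simp
      simp only [List.length_append, List.length_cons, List.length_nil]
      omega
    · conv_lhs => rw [decChars]
      rw [if_neg hm]
      simp only [List.length_append, List.length_cons, List.length_nil]
      have := ih (Nat.div_le_div_right h)
      omega

theorem bDsum_le (m : Nat) : bDsum m ≤ 9 * (decChars m).length := by
  induction m using decChars.induct with
  | case1 m h => rw [bDsum_lt10 h, decChars, if_pos h]; simp; omega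
  | case2 m h ih =>
    rw [bDsum, dif_neg (by omega)]
    conv_rhs => rw [decChars]
    rw [if_neg h]
    simp only [List.length_append, List.length_cons, List.length_nil]
    have := Nat.mod_lt m (y := 10) (by norm_num)
    omega

theorem bDsum_mul_add {y z : Nat} (h : z < 10) : bDsum (10 * y + z) = bDsum y + z := by
  by_cases hy : y = 0
  · subst hy; rw [bDsum_zero]; simpa using bDsum_lt10 h
  · rw [bDsum, dif_neg (by omega)]
    rw [Nat.mul_add_mod, Nat.mod_eq_of_lt h]
    rw [Nat.mul_add_div (by norm_num), Nat.div_eq_of_lt h, Nat.add_zero]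
    omega

theorem toDigitsCore_eq (f : Nat) : ∀ (n : Nat) (l : List Char), n < 10 ^ (f + 1) →
    Nat.toDigitsCore 10 (f + 1) n l = decChars n ++ l := by
  induction f with
  | zero =>
    intro n l h
    have h' : n < 10 := by simpa using h
    rw [Nat.toDigitsCore]
    conv_rhs => rw [decChars]
    simp [Nat.div_eq_of_lt h', Nat.mod_eq_of_lt h', h']
  | succ f ih =>
    intro n l h
    rw [Nat.toDigitsCore]
    by_cases h10 : n < 10
    · rw [if_pos (Nat.div_eq_of_lt h10)]
      conv_rhs => rw [decChars]
      simp [h10, Nat.mod_eq_of_lt h10]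
    · have hq : n / 10 ≠ 0 := fun hc => h10 (by omega)
      rw [if_neg hq, ih (n / 10) _ (by
        rw [Nat.div_lt_iff_lt_mul (by norm_num)]
        calc n < 10 ^ (f + 1 + 1) := h
        _ = 10 ^ (f + 1) * 10 := by ring)]
      conv_rhs => rw [decChars]
      rw [if_neg h10]
      simp

theorem toDigits_eq (n : Nat) : Nat.toDigits 10 n = decChars n := by
  have h : n < 10 ^ (n + 1) := by
    calc n < 10 ^ n := Nat.lt_pow_self (by norm_num)
    _ ≤ 10 ^ (n + 1) := Nat.pow_le_pow_right (by norm_num) (by omega)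
  rw [Nat.toDigits]
  rw [toDigitsCore_eq n n [] h]
  simp

theorem toChars_eq {n : Int} (h : 0 ≤ n) : PySem.Int.toChars n = decChars n.toNat := by
  rw [PySem.Int.toChars, if_neg (by omega), toDigits_eq]

theorem sum_range_mul10 {M : Type} [AddCommMonoid M] (f : Nat → M) (Q : Nat) :
    ∑ i ∈ Finset.range (10 * Q), f i = ∑ y ∈ Finset.range Q, ∑ z ∈ Finset.range 10, f (10 * y + z) := by
  induction Q with
  | zero => simp
  | succ Q ih =>
    have h : 10 * (Q + 1) = 10 * Q + 10 := by ring
    rw [h, Finset.sum_range_add, ih]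
    conv_rhs => rw [Finset.sum_range_succ]

theorem sum_ind_run (dq R s : Nat) :
    (∑ z ∈ Finset.range R, if dq + z = s then (1 : Nat) else 0)
      = if dq ≤ s ∧ s < dq + R then 1 else 0 := by
  induction R with
  | zero => rw [Finset.range_zero, Finset.sum_empty, if_neg (by omega)]
  | succ R ih =>
    rw [Finset.sum_range_succ, ih]
    split_ifs <;> omega

theorem sum_val_run (dq R s c : Nat) :
    (∑ z ∈ Finset.range R, if dq + z = s then c + z else 0)
      = if dq ≤ s ∧ s < dq + R then c + (s - dq) else 0 := by
  induction R with
  | zero => rw [Finset.range_zero, Finset.sum_empty, if_neg (by omega)]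
  | succ R ih =>
    rw [Finset.sum_range_succ, ih]
    split_ifs <;> omega

theorem cntF_rec (m s : Nat) :
    cntF m s = (∑ z ∈ Finset.range 10, if z ≤ s then cntF (m / 10) (s - z) else 0)
      + (if bDsum (m / 10) ≤ s ∧ s < bDsum (m / 10) + m % 10 then 1 else 0) := by
  have hm : m = 10 * (m / 10) + m % 10 := by omega
  simp only [cntF, Finset.card_filter]
  conv_lhs => rw [hm]
  rw [Finset.sum_range_add, sum_range_mul10, Finset.sum_comm]
  congr 1
  · apply Finset.sum_congr rfl
    intro z hz
    have hz10 : z < 10 := Finset.mem_range.mp hz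
    by_cases hzs : z ≤ s
    · rw [if_pos hzs]
      apply Finset.sum_congr rfl
      intro y _
      rw [bDsum_mul_add hz10]
      by_cases hy : bDsum y = s - z
      · rw [if_pos (by omega), if_pos hy]
      · rw [if_neg (by omega), if_neg hy]
    · rw [if_neg hzs]
      apply Finset.sum_eq_zero
      intro y _
      rw [bDsum_mul_add hz10]
      rw [if_neg (by omega)]
  · rw [← sum_ind_run (bDsum (m / 10)) (m % 10) s]
    apply Finset.sum_congr rfl
    intro z hz
    have hz' : z < m % 10 := Finset.mem_range.mp hz
    rw [bDsum_mul_add (by omega : z < 10)]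

theorem smF_rec (m s : Nat) :
    smF m s = (∑ z ∈ Finset.range 10,
        if z ≤ s then 10 * smF (m / 10) (s - z) + z * cntF (m / 10) (s - z) else 0)
      + (if bDsum (m / 10) ≤ s ∧ s < bDsum (m / 10) + m % 10
          then 10 * (m / 10) + (s - bDsum (m / 10)) else 0) := by
  have hm : m = 10 * (m / 10) + m % 10 := by omega
  simp only [smF, cntF, Finset.card_filter, Finset.sum_filter]
  conv_lhs => rw [hm]
  rw [Finset.sum_range_add, sum_range_mul10, Finset.sum_comm]
  congr 1
  · apply Finset.sum_congr rfl
    intro z hz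
    have hz10 : z < 10 := Finset.mem_range.mp hz
    by_cases hzs : z ≤ s
    · rw [if_pos hzs, Finset.mul_sum, Finset.mul_sum, ← Finset.sum_add_distrib]
      apply Finset.sum_congr rfl
      intro y _
      rw [bDsum_mul_add hz10]
      by_cases hy : bDsum y = s - z
      · rw [if_pos (by omega), if_pos hy, if_pos hy]
        ring
      · rw [if_neg (by omega), if_neg hy, if_neg hy]
        ring
    · rw [if_neg hzs]
      apply Finset.sum_eq_zero
      intro y _
      rw [bDsum_mul_add hz10]
      rw [if_neg (by omega)]
  · rw [← sum_val_run (bDsum (m / 10)) (m % 10) s (10 * (m / 10))]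
    apply Finset.sum_congr rfl
    intro z hz
    have hz' : z < m % 10 := Finset.mem_range.mp hz
    rw [bDsum_mul_add (by omega : z < 10)]

theorem list_filter_sum (n s : Nat) (g : Nat → Int) :
    (((List.range n).filter (fun z => z ≤ s)).map g).sum
      = ∑ z ∈ Finset.range n, if z ≤ s then g z else 0 := by
  induction n with
  | zero => simp
  | succ n ih =>
    rw [List.range_succ, List.filter_append, List.map_append, List.sum_append,
      Finset.sum_range_succ, ← ih]
    by_cases h : n ≤ s <;> simp [h]

theorem bRec_eq (L : Nat) (m : Nat) :
    bRec L m = ((List.range L).map fun s => (cntF m s : Int),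
                (List.range L).map fun s => (smF m s : Int)) := by
  induction m using Nat.strong_induction_on with
  | _ m ih =>
    rw [bRec]
    by_cases h0 : m = 0
    · rw [dif_pos h0]
      subst h0
      simp [cntF, smF, List.map_const']
    · rw [dif_neg h0]
      simp only [ih (m / 10) (Nat.div_lt_self (Nat.pos_of_ne_zero h0) (by norm_num))]
      rw [Prod.mk.injEq]
      constructor
      · apply List.map_congr_left
        intro s hs
        have hsL : s < L := List.mem_range.mp hs
        rw [list_filter_sum, cntF_rec m s]
        push_cast
        congr 1
        apply Finset.sum_congr rfl
        intro z _
        by_cases hzs : z ≤ s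
        · rw [if_pos hzs, if_pos hzs, PySem.List.getD_map_range _ L (s - z) 0 (by omega)]
        · rw [if_neg hzs, if_neg hzs]
      · apply List.map_congr_left
        intro s hs
        have hsL : s < L := List.mem_range.mp hs
        rw [list_filter_sum, smF_rec m s]
        push_cast
        congr 1
        · apply Finset.sum_congr rfl
          intro z _
          by_cases hzs : z ≤ s
          · rw [if_pos hzs, if_pos hzs, PySem.List.getD_map_range _ L (s - z) 0 (by omega),
              PySem.List.getD_map_range _ L (s - z) 0 (by omega)]
          · rw [if_neg hzs, if_neg hzs]
        · by_cases hc : bDsum (m / 10) ≤ s ∧ s < bDsum (m / 10) + m % 10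
          · rw [if_pos hc, if_pos hc]
            push_cast [Nat.cast_sub hc.1]
            ring
          · rw [if_neg hc, if_neg hc]

theorem cntF_succ_eq (k s : Nat) : cntF (k + 1) s = cntA k s + (if s = 0 then 1 else 0) := by
  have hr : Finset.range (k + 1) = insert 0 (Finset.Icc 1 k) := by
    ext i; simp [Finset.mem_range, Finset.mem_Icc]; omega
  rw [cntF, cntA, hr, Finset.filter_insert]
  by_cases hs : s = 0
  · rw [if_pos (by rw [bDsum_zero]; omega), Finset.card_insert_of_notMem (by simp), if_pos hs]
  · rw [if_neg (by rw [bDsum_zero]; omega), if_neg hs, Nat.add_zero]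

theorem smF_succ_eq (k s : Nat) : smF (k + 1) s = smA k s := by
  have hr : Finset.range (k + 1) = insert 0 (Finset.Icc 1 k) := by
    ext i; simp [Finset.mem_range, Finset.mem_Icc]; omega
  rw [smF, smA, hr, Finset.filter_insert]
  by_cases hs : bDsum 0 = s
  · rw [if_pos hs, Finset.sum_insert (by simp), Nat.zero_add]
  · rw [if_neg hs]

theorem cntA_succ (k s : Nat) :
    cntA (k + 1) s = cntA k s + (if bDsum (k + 1) = s then 1 else 0) := by
  have hr : Finset.Icc 1 (k + 1) = insert (k + 1) (Finset.Icc 1 k) := by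
    ext i; simp [Finset.mem_Icc]; omega
  rw [cntA, cntA, hr, Finset.filter_insert]
  by_cases hd : bDsum (k + 1) = s
  · rw [if_pos hd, Finset.card_insert_of_notMem (by simp), if_pos hd]
  · rw [if_neg hd, if_neg hd, Nat.add_zero]

theorem smA_succ (k s : Nat) :
    smA (k + 1) s = smA k s + (if bDsum (k + 1) = s then k + 1 else 0) := by
  have hr : Finset.Icc 1 (k + 1) = insert (k + 1) (Finset.Icc 1 k) := by
    ext i; simp [Finset.mem_Icc]; omega
  rw [smA, smA, hr, Finset.filter_insert]
  by_cases hd : bDsum (k + 1) = s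
  · rw [if_pos hd, Finset.sum_insert (by simp), if_pos hd]
    omega
  · rw [if_neg hd, if_neg hd, Nat.add_zero]

theorem mapset {α : Type} (L k : Nat) (f : Nat → α) (v : α) :
    ((List.range L).map f).set k v = (List.range L).map (fun s => if s = k then v else f s) := by
  apply List.ext_getElem
  · simp
  · intro i h1 h2
    simp only [List.getElem_set, List.getElem_map, List.getElem_range]
    rcases eq_or_ne i k with hik | hik
    · simp [hik]
    · rw [if_neg (Ne.symm hik), if_neg hik]

theorem strsum {i : Int} (h : 0 ≤ i) :
    ((PySem.Int.toStr i).toList.map (fun d => (d.toNat : Int) - 48)).sum = (bDsum i.toNat : Int) := by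
  rw [PySem.Int.toList_toStr, toChars_eq h, sum_decChars]

theorem A_loop (L : Nat) (k : Nat) (hk : ∀ j, 1 ≤ j → j ≤ k → bDsum j < L) :
    (PySem.List.pyRange 1 (1 + (k : Int)) 1).foldl
      (fun (st : List Int × List Int) i =>
        (PySem.List.pySetD st.1 (((PySem.Int.toStr i).toList.map (fun d => (d.toNat : Int) - 48)).sum)
           (PySem.List.pyGetD st.1 (((PySem.Int.toStr i).toList.map (fun d => (d.toNat : Int) - 48)).sum) 0 + 1),
         PySem.List.pySetD st.2 (((PySem.Int.toStr i).toList.map (fun d => (d.toNat : Int) - 48)).sum)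
           (PySem.List.pyGetD st.2 (((PySem.Int.toStr i).toList.map (fun d => (d.toNat : Int) - 48)).sum) 0 + i)))
      (List.replicate L 0, List.replicate L 0)
    = ((List.range L).map fun s => (cntA k s : Int),
       (List.range L).map fun s => (smA k s : Int)) := by
  induction k with
  | zero =>
    rw [show ((0 : Nat) : Int) = 0 by rfl, add_zero, PySem.List.pyRange_one_eq_nil (by omega),
      List.foldl_nil]
    simp [cntA, smA, List.map_const']
  | succ k ih =>
    have hk' : ∀ j, 1 ≤ j → j ≤ k → bDsum j < L := fun j h1 h2 => hk j h1 (by omega)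
    have hcast : (1 : Int) + ((k + 1 : Nat) : Int) = (1 + (k : Int)) + 1 := by push_cast; ring
    rw [hcast, PySem.List.pyRange_one_succ_right (by omega), List.foldl_append, ih hk',
      List.foldl_cons, List.foldl_nil]
    have hK : ((1 : Int) + (k : Int)).toNat = k + 1 := by omega
    have hs : ((PySem.Int.toStr (1 + (k : Int))).toList.map (fun d => (d.toNat : Int) - 48)).sum
        = ((bDsum (k + 1) : Nat) : Int) := by
      rw [strsum (by omega), hK]
    have hKL : bDsum (k + 1) < L := hk (k + 1) (by omega) (by omega)
    simp only [hs]
    simp only [PySem.List.pyGetD_natCast, PySem.List.pySetD_natCast]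
    rw [PySem.List.getD_map_range _ L (bDsum (k + 1)) 0 hKL,
        PySem.List.getD_map_range _ L (bDsum (k + 1)) 0 hKL,
        mapset, mapset]
    rw [Prod.mk.injEq]
    constructor
    · apply List.map_congr_left
      intro s _
      rw [cntA_succ]
      rcases eq_or_ne s (bDsum (k + 1)) with hsk | hsk
      · rw [if_pos hsk, hsk, if_pos rfl]
        push_cast
        ring
      · rw [if_neg hsk, if_neg (fun hh => hsk hh.symm), Nat.add_zero]
    · apply List.map_congr_left
      intro s _
      rw [smA_succ]
      rcases eq_or_ne s (bDsum (k + 1)) with hsk | hsk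
      · rw [if_pos hsk, hsk, if_pos rfl]
        push_cast
        ring
      · rw [if_neg hsk, if_neg (fun hh => hsk hh.symm), Nat.add_zero]

theorem A_eq (n : Int) :
    go_py n = ((List.range (9 * (PySem.Int.toStr n).toList.length + 1)).map fun s => (cntA n.toNat s : Int),
               (List.range (9 * (PySem.Int.toStr n).toList.length + 1)).map fun s => (smA n.toNat s : Int)) := by
  simp only [go_py, PySem.Str.len_eq, PySem.List.pyRepeat_singleton,
    PySem.List.len_eq, List.length_replicate]
  have ht : (9 * ((PySem.Int.toStr n).toList.length : Int) + 1).toNat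
      = 9 * (PySem.Int.toStr n).toList.length + 1 := by omega
  rw [ht]
  rw [show ((9 * (PySem.Int.toStr n).toList.length + 1 : Nat) : Int).toNat
      = 9 * (PySem.Int.toStr n).toList.length + 1 by omega]
  by_cases hn : n < 1
  · rw [PySem.List.pyRange_one_eq_nil (by omega), List.foldl_nil]
    rw [show n.toNat = 0 by omega]
    simp [cntA, smA, List.map_const']
  · have hcast : n + 1 = 1 + ((n.toNat : Nat) : Int) := by omega
    rw [hcast]
    apply A_loop
    intro j h1 h2
    have b1 := bDsum_le j
    have b2 := len_decChars_mono h2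
    have hc : (PySem.Int.toStr n).toList.length = (decChars n.toNat).length := by
      rw [PySem.Int.toList_toStr, toChars_eq (by omega : (0:Int) ≤ n)]
    omega

theorem B_eq (n : Int) :
    go_py_alt n = ((List.range (9 * (PySem.Int.toStr n).toList.length + 1)).map fun s => (cntA n.toNat s : Int),
                   (List.range (9 * (PySem.Int.toStr n).toList.length + 1)).map fun s => (smA n.toNat s : Int)) := by
  simp only [go_py_alt, PySem.Str.len_eq]
  have ht : (9 * ((PySem.Int.toStr n).toList.length : Int) + 1).toNat
      = 9 * (PySem.Int.toStr n).toList.length + 1 := by omega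
  rw [ht]
  by_cases hn : n < 1
  · rw [if_pos hn, show n.toNat = 0 by omega]
    simp [cntA, smA, List.map_const']
  · rw [if_neg hn, bRec_eq, show (n + 1).toNat = n.toNat + 1 by omega]
    rw [Prod.mk.injEq]
    constructor
    · rw [PySem.List.getD_map_range _ _ 0 0 (by omega), mapset]
      apply List.map_congr_left
      intro s _
      rcases eq_or_ne s 0 with hs0 | hs0
      · rw [if_pos hs0, hs0, cntF_succ_eq, if_pos rfl]
        push_cast
        ring
      · rw [if_neg hs0, cntF_succ_eq, if_neg hs0, Nat.add_zero]
    · apply List.map_congr_left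
      intro s _
      rw [smF_succ_eq]

-- ===== VERDICT (by name: the statement is the Claim_ definition above) =====
theorem go_py_spec : Claim_equal_go_py := by
  intro n _
  unfold Spec_go_py
  rw [A_eq, B_eq]
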